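-- pv_equiv track=rewrite | github.com/IsmailCharfi/search_engine | api/test.py | transform_expression
-- ===== SOURCE A (Python) =====
-- def transform_expression(input_string):
--     operators = {'=': 'equal_', '>': 'gt_', '<': 'lt_', '>=': 'gte_', '<=': 'lte_'}
--
--     operand1 = ""
--     operator = ""
--     operand2 = ""
--     for char in input_string:
--         if char.isalnum() or char == ' ':
--             if not operator:
--                 operand1 += char
--             else:
--                 operand2 += char
--         else:
--             operator += char
--
--     if operator in operators:
--         transformed_string = f'{operators[operator]}("{operand1.strip()}", "{operand2.strip()}")'
--         return transformed_string
--     else: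
--         raise Exception("Invalid expression")
-- ===== SOURCE B (Python) =====
-- def transform_expression(input_string):
--     operators = {'=': 'equal_', '>': 'gt_', '<': 'lt_', '>=': 'gte_', '<=': 'lte_'}
--
--     def is_operand_char(ch):
--         return ch.isalnum() or ch == ' '
--
--     i = next((k for k, ch in enumerate(input_string) if not is_operand_char(ch)),
--              len(input_string))
--     operand1 = input_string[:i]
--     operator = ''.join(ch for ch in input_string if not is_operand_char(ch))
--     operand2 = ''.join(ch for ch in input_string[i:] if is_operand_char(ch))
--
--     if operator in operators:
--         return f'{operators[operator]}("{operand1.strip()}", "{operand2.strip()}")'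
--     raise Exception("Invalid expression")
-- ===== Notes on version B (the rewrite author's own statement) =====
-- stated objective: alternative
-- what changed: Replaces A's single stateful scan with an `if not operator` flag by a decomposition: locate the first non-(alnum/space) character, take the prefix slice as operand1, filter all operator characters from the whole string as the operator, and filter the operand characters from the tail slice as operand2.
import Mathlib
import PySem

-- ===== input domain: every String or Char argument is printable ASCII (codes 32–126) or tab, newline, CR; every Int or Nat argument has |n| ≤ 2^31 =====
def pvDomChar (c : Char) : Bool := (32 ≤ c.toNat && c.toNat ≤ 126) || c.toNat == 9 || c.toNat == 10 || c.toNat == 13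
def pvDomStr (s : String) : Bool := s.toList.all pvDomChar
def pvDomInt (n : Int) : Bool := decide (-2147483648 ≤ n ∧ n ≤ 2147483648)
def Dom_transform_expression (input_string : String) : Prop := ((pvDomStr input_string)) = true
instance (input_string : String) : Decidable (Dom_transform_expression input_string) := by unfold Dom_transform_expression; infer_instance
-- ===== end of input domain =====

-- B replaces A's single stateful scan (flag `if not operator`) by a decomposition:
-- first-operator-index + prefix slice + two filters; same cost, different structure.

-- shared helpers: character class and the operators dict literal
def pvGood (c : Char) : Bool := PySem.Chars.isalnum c || (c == ' ')

def pvOperators : PySem.Dict String String :=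
  PySem.Dict.ofList [("=", "equal_"), (">", "gt_"), ("<", "lt_"), (">=", "gte_"), ("<=", "lte_")]

-- ===== PORT A =====
-- the loop body of A's `for char in input_string`
def pvStepA (st : List Char × List Char × List Char) (c : Char) : List Char × List Char × List Char :=
  if pvGood c then
    if st.2.1.isEmpty then (st.1 ++ [c], st.2.1, st.2.2) else (st.1, st.2.1, st.2.2 ++ [c])
  else (st.1, st.2.1 ++ [c], st.2.2)

def transform_expression (input_string : String) : String :=
  let st := input_string.toList.foldl pvStepA ([], [], [])
  match pvOperators.get? (String.mk st.2.1) with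
  | some f =>
      f ++ "(\"" ++ PySem.Str.strip (String.mk st.1) ++ "\", \"" ++
        PySem.Str.strip (String.mk st.2.2) ++ "\")"
  | none => ""   -- Python A raises Exception here; excluded by Pre_

-- ===== PORT B =====
def transform_expression_alt (input_string : String) : String :=
  let l := input_string.toList
  let i := l.findIdx (fun c => !pvGood c)   -- next((k for k,ch …), len)
  let operand1 := l.take i                  -- input_string[:i]
  let operator := l.filter (fun c => !pvGood c)
  let operand2 := (l.drop i).filter pvGood  -- input_string[i:], filtered
  match pvOperators.get? (String.mk operator) with
  | some f =>
      f ++ "(\"" ++ PySem.Str.strip (String.mk operand1) ++ "\", \"" ++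
        PySem.Str.strip (String.mk operand2) ++ "\")"
  | none => ""   -- Python B raises Exception here; excluded by Pre_

-- ===== PRECONDITION & SPEC =====
-- Pre_ excludes exactly the inputs on which Python A raises Exception("Invalid expression"):
-- those whose non-(alnum/space) characters do not spell one of the five operator keys.
def Pre_transform_expression (input_string : String) : Prop :=
  String.mk (input_string.toList.filter (fun c => !pvGood c)) ∈
    (["=", ">", "<", ">=", "<="] : List String)
instance (input_string : String) : Decidable (Pre_transform_expression input_string) := by
  unfold Pre_transform_expression; infer_instance

def pvWitness_transform_expression : String := "price >= 10"

def Spec_transform_expression (input_string : String) (out : String) : Prop :=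
  out = transform_expression_alt input_string
instance (input_string : String) (out : String) : Decidable (Spec_transform_expression input_string out) := by
  unfold Spec_transform_expression; infer_instance

-- ===== CLAIM (what is proved, stated in full; the proofs are below) =====
def Claim_equal_transform_expression : Prop :=
  ∀ (input_string : String), Dom_transform_expression input_string →
    Pre_transform_expression input_string →
    Spec_transform_expression input_string (transform_expression input_string)

-- ===== LEMMAS AND PROOFS =====

-- once the operator accumulator is nonempty, A's loop only appends the two filters
lemma pv_foldl_after (l : List Char) (o1 op o2 : List Char) (h : op ≠ []) :
    l.foldl pvStepA (o1, op, o2) =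
      (o1, op ++ l.filter (fun c => !pvGood c), o2 ++ l.filter pvGood) := by
  induction l generalizing op o2 with
  | nil => simp
  | cons c l ih =>
    by_cases hc : pvGood c = true
    · simp [List.foldl_cons, pvStepA, hc, List.isEmpty_iff, h, ih op (o2 ++ [c]) h,
        List.filter_cons]
    · have hc' : pvGood c = false := by simpa using hc
      simp [List.foldl_cons, pvStepA, hc', ih (op ++ [c]) o2 (by simp), List.filter_cons,
        List.append_assoc]

-- A's full loop from an all-good prefix state equals B's decomposition (takeWhile form)
lemma pv_foldl_main (l : List Char) (o1 : List Char) :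
    l.foldl pvStepA (o1, [], []) =
      (o1 ++ l.takeWhile pvGood, l.filter (fun c => !pvGood c),
        (l.dropWhile pvGood).filter pvGood) := by
  induction l generalizing o1 with
  | nil => simp
  | cons c l ih =>
    by_cases hc : pvGood c = true
    · simp [List.foldl_cons, pvStepA, hc, ih (o1 ++ [c]), List.takeWhile_cons, List.filter_cons,
        List.dropWhile_cons]
    · have hc' : pvGood c = false := by simpa using hc
      simp [List.foldl_cons, pvStepA, hc', pv_foldl_after l o1 [c] [] (by simp),
        List.takeWhile_cons, List.filter_cons, List.dropWhile_cons]

-- B's slice index agrees with takeWhile/dropWhile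
lemma pv_take_findIdx (l : List Char) :
    l.take (l.findIdx (fun c => !pvGood c)) = l.takeWhile pvGood := by
  induction l with
  | nil => rfl
  | cons c l ih =>
    by_cases hc : pvGood c = true
    · simp [List.findIdx_cons, hc, List.takeWhile_cons, ih]
    · have hc' : pvGood c = false := by simpa using hc
      simp [List.findIdx_cons, hc', List.takeWhile_cons]

lemma pv_drop_findIdx (l : List Char) :
    l.drop (l.findIdx (fun c => !pvGood c)) = l.dropWhile pvGood := by
  induction l with
  | nil => rfl
  | cons c l ih =>
    by_cases hc : pvGood c = true
    · simp [List.findIdx_cons, hc, List.dropWhile_cons, ih]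
    · have hc' : pvGood c = false := by simpa using hc
      simp [List.findIdx_cons, hc', List.dropWhile_cons]

-- ===== VERDICT (by name: the statement is the Claim_ definition above) =====
theorem transform_expression_spec : Claim_equal_transform_expression := by
  intro s _ _
  unfold Spec_transform_expression transform_expression transform_expression_alt
  simp only [pv_foldl_main s.toList [], pv_take_findIdx, pv_drop_findIdx, List.nil_append]
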